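-- pv_equiv track=rewrite | github.com/purvesh1/Sentiment-Analysis-App | src/sentimentAnalysisApp/components/data_transformation.py | add_ABS_list
-- ===== SOURCE A (Python) =====
-- def add_ABS_list(reviews):
-- # Aspects and sentiments
--     aspects = ['price', 'anecdotes', 'food', 'ambience', 'service']
--     sentiments = ['positive', 'neutral', 'negative', 'conflict', 'none']
--
--     combinations_list = [f"{aspect} - {sentiment}" for aspect in aspects for sentiment in sentiments]
--
--     # Create lists to hold the expanded reviews and combinations
--     expanded_reviews = []
--     expanded_combinations = []
--
--     # For each review in the input, add all combinations
--     for review in reviews: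
--         for combo in combinations_list:
--             expanded_reviews.append(review)
--             expanded_combinations.append(combo)
--
--     return expanded_reviews, expanded_combinations
-- ===== SOURCE B (Python) =====
-- def add_ABS_list(reviews):
--     # Index-arithmetic construction: one flat pass over k = 0..25*n-1,
--     # decoding review and aspect/sentiment from k by divmod; no nested loop,
--     # no precomputed combinations list.
--     aspects = ['price', 'anecdotes', 'food', 'ambience', 'service']
--     sentiments = ['positive', 'neutral', 'negative', 'conflict', 'none']
--     expanded_reviews = []
--     expanded_combinations = []
--     for k in range(25 * len(reviews)):
--         expanded_reviews.append(reviews[k // 25])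
--         expanded_combinations.append(aspects[k % 25 // 5] + " - " + sentiments[k % 5])
--     return expanded_reviews, expanded_combinations
-- ===== Notes on version B (the rewrite author's own statement) =====
-- stated objective: alternative
-- what changed: Replaces A's nested loop over a precomputed 25-element combinations list by a single flat loop over k in range(25*n) that decodes the review index and the aspect/sentiment pair from k with floor-division and modulo; the combinations list is never materialised.
import Mathlib
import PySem

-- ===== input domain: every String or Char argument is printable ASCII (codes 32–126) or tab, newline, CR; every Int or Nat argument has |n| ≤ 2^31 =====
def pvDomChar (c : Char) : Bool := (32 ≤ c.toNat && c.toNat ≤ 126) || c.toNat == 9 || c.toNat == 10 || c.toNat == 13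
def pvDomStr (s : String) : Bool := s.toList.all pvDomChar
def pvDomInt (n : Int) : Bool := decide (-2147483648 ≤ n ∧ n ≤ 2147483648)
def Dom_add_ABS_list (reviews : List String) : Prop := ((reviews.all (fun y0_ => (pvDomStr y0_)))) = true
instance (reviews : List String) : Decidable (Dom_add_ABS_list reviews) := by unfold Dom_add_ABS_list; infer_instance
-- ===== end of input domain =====

-- B replaces A's nested loop over a precomputed 25-element combinations list by one
-- flat loop over k < 25*n that decodes review and aspect/sentiment from k by divmod;
-- objective: alternative (same outputs, same order, same cost).

-- ===== PORT A =====
def add_ABS_list (reviews : List String) : List String × List String :=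
  let aspects := ["price", "anecdotes", "food", "ambience", "service"]
  let sentiments := ["positive", "neutral", "negative", "conflict", "none"]
  let combinations_list := aspects.flatMap (fun aspect => sentiments.map (fun sentiment => aspect ++ " - " ++ sentiment))
  -- for review in reviews: for combo in combinations_list: append to both accumulators
  let acc := reviews.foldl (fun (acc : List String × List String) review =>
    combinations_list.foldl (fun acc combo => (acc.1 ++ [review], acc.2 ++ [combo])) acc) ([], [])
  (acc.1, acc.2)

-- ===== PORT B =====
def add_ABS_list_alt (reviews : List String) : List String × List String :=
  let aspects := ["price", "anecdotes", "food", "ambience", "service"]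
  let sentiments := ["positive", "neutral", "negative", "conflict", "none"]
  -- for k in range(25*len(reviews)): append reviews[k//25] and aspects[k%25//5] + " - " + sentiments[k%5]
  -- (indices are always in range, so pyGetD with default "" is exact here)
  let acc := (PySem.List.pyRange 0 (25 * (reviews.length : Int)) 1).foldl
    (fun (acc : List String × List String) k =>
      (acc.1 ++ [PySem.List.pyGetD reviews (PySem.Int.floordiv k 25) ""],
       acc.2 ++ [PySem.List.pyGetD aspects (PySem.Int.floordiv (PySem.Int.mod k 25) 5) ""
                 ++ " - " ++ PySem.List.pyGetD sentiments (PySem.Int.mod k 5) ""]))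
    ([], [])
  (acc.1, acc.2)

-- ===== PRECONDITION & SPEC =====
def Spec_add_ABS_list (reviews : List String) (out : List String × List String) : Prop := out = add_ABS_list_alt reviews
instance (reviews : List String) (out : List String × List String) : Decidable (Spec_add_ABS_list reviews out) := by unfold Spec_add_ABS_list; infer_instance

-- ===== CLAIM =====
def Claim_equal_add_ABS_list : Prop := ∀ (reviews : List String), Dom_add_ABS_list reviews → Spec_add_ABS_list reviews (add_ABS_list reviews)

-- ===== LEMMAS AND PROOFS =====

-- the fixed 25 combinations, for the proofs
def pvCombos : List String :=
  ["price", "anecdotes", "food", "ambience", "service"].flatMap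
    (fun a => ["positive", "neutral", "negative", "conflict", "none"].map (fun s => a ++ " - " ++ s))

-- A's inner loop appends the review once per combo and the combos themselves.
theorem pv_inner (combos : List String) (r : String) (acc : List String × List String) :
    combos.foldl (fun acc combo => (acc.1 ++ [r], acc.2 ++ [combo])) acc
      = (acc.1 ++ combos.map (fun _ => r), acc.2 ++ combos) := by
  induction combos generalizing acc with
  | nil => simp
  | cons c cs ih => simp [List.foldl, ih]

-- A's outer loop in closed form.
theorem pv_outer (combos : List String) (reviews : List String) (acc : List String × List String) :
    reviews.foldl (fun (acc : List String × List String) review =>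
        combos.foldl (fun acc combo => (acc.1 ++ [review], acc.2 ++ [combo])) acc) acc
      = (acc.1 ++ reviews.flatMap (fun r => combos.map (fun _ => r)),
         acc.2 ++ (List.replicate reviews.length combos).flatten) := by
  induction reviews generalizing acc with
  | nil => simp
  | cons r rs ih =>
    rw [List.foldl_cons, pv_inner, ih]
    simp [List.replicate_succ, List.append_assoc]

-- a lockstep pair-append fold is a pair of maps
theorem pv_pairfold (l : List Int) (f g : Int → String) (acc : List String × List String) :
    l.foldl (fun acc k => (acc.1 ++ [f k], acc.2 ++ [g k])) acc
      = (acc.1 ++ l.map f, acc.2 ++ l.map g) := by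
  induction l generalizing acc with
  | nil => simp
  | cons x xs ih => simp [List.foldl, ih]

-- decode the review index: (25*n+j) // 25 = n
theorem pv_div25 (n j : Nat) (hj : j < 25) :
    PySem.Int.floordiv ((25 * n + j : Nat) : Int) 25 = (n : Int) := by
  rw [PySem.Int.floordiv_eq_ediv_of_pos (by norm_num)]
  omega

-- decode the combo index: (25*n+j) % 25 = j
theorem pv_mod25 (n j : Nat) (hj : j < 25) :
    PySem.Int.mod ((25 * n + j : Nat) : Int) 25 = (j : Int) := by
  rw [PySem.Int.mod_eq_emod_of_pos (by norm_num)]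
  omega

-- B's review column over one 25-block is 25 copies of reviews[n]
theorem pv_blockR (reviews : List String) (n : Nat) (hn : n < reviews.length) :
    (List.range 25).map (fun j =>
        PySem.List.pyGetD reviews (PySem.Int.floordiv ((25 * n + j : Nat) : Int) 25) "")
      = List.replicate 25 reviews[n] := by
  have h : ∀ j ∈ List.range 25,
      PySem.List.pyGetD reviews (PySem.Int.floordiv ((25 * n + j : Nat) : Int) 25) ""
        = reviews[n] := by
    intro j hj
    rw [pv_div25 n j (List.mem_range.mp hj), PySem.List.pyGetD_natCast,
      List.getD_eq_getElem?_getD, List.getElem?_eq_getElem hn]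
    rfl
  rw [List.map_congr_left h]
  simp

-- B's combo column over one 25-block is exactly the 25 combinations
theorem pv_blockC (n : Nat) :
    (List.range 25).map (fun j =>
        PySem.List.pyGetD ["price", "anecdotes", "food", "ambience", "service"]
            (PySem.Int.floordiv (PySem.Int.mod ((25 * n + j : Nat) : Int) 25) 5) ""
          ++ " - " ++
          PySem.List.pyGetD ["positive", "neutral", "negative", "conflict", "none"]
            (PySem.Int.mod ((25 * n + j : Nat) : Int) 5) "")
      = pvCombos := by
  have h : ∀ j ∈ List.range 25,
      (PySem.List.pyGetD ["price", "anecdotes", "food", "ambience", "service"]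
            (PySem.Int.floordiv (PySem.Int.mod ((25 * n + j : Nat) : Int) 25) 5) ""
          ++ " - " ++
          PySem.List.pyGetD ["positive", "neutral", "negative", "conflict", "none"]
            (PySem.Int.mod ((25 * n + j : Nat) : Int) 5) "")
        = (List.getD ["price", "anecdotes", "food", "ambience", "service"] (j / 5) ""
           ++ " - " ++ List.getD ["positive", "neutral", "negative", "conflict", "none"] (j % 5) "") := by
    intro j hj
    have hj25 := List.mem_range.mp hj
    rw [pv_mod25 n j hj25]
    have h5 : PySem.Int.floordiv ((j : Nat) : Int) 5 = ((j / 5 : Nat) : Int) := by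
      rw [PySem.Int.floordiv_eq_ediv_of_pos (by norm_num)]; omega
    have m5 : PySem.Int.mod ((25 * n + j : Nat) : Int) 5 = ((j % 5 : Nat) : Int) := by
      rw [PySem.Int.mod_eq_emod_of_pos (by norm_num)]; omega
    rw [h5, m5, PySem.List.pyGetD_natCast, PySem.List.pyGetD_natCast]
  rw [List.map_congr_left h]
  decide

-- B's fold in closed form, by induction on the number of reviews consumed
theorem pv_B (reviews : List String) (n : Nat) (hn : n ≤ reviews.length) :
    ((List.range (25 * n)).map (fun k =>
        PySem.List.pyGetD reviews (PySem.Int.floordiv ((k : Nat) : Int) 25) ""),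
     (List.range (25 * n)).map (fun k =>
        PySem.List.pyGetD ["price", "anecdotes", "food", "ambience", "service"]
            (PySem.Int.floordiv (PySem.Int.mod ((k : Nat) : Int) 25) 5) ""
          ++ " - " ++
          PySem.List.pyGetD ["positive", "neutral", "negative", "conflict", "none"]
            (PySem.Int.mod ((k : Nat) : Int) 5) ""))
      = ((reviews.take n).flatMap (fun r => List.replicate 25 r),
         (List.replicate n pvCombos).flatten) := by
  induction n with
  | zero => simp
  | succ m ih =>
    have hm : m ≤ reviews.length := Nat.le_of_succ_le hn
    have hmlt : m < reviews.length := hn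
    have hsplit : 25 * (m + 1) = 25 * m + 25 := by ring
    rw [hsplit, List.range_add, List.map_append, List.map_append, List.map_map, List.map_map]
    have ihv := ih hm
    have h1 := congrArg Prod.fst ihv
    have h2 := congrArg Prod.snd ihv
    simp only at h1 h2
    rw [h1, h2]
    have hR := pv_blockR reviews m hmlt
    have hC := pv_blockC m
    refine Prod.ext ?_ ?_ <;> simp only []
    · rw [show ((fun k =>
          PySem.List.pyGetD reviews (PySem.Int.floordiv ((k : Nat) : Int) 25) "") ∘ (fun j => 25 * m + j))
          = (fun j => PySem.List.pyGetD reviews (PySem.Int.floordiv ((25 * m + j : Nat) : Int) 25) "") from rfl,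
        hR]
      rw [List.take_add_one, List.getElem?_eq_getElem hmlt]
      rw [Option.toList_some, List.flatMap_append]
      simp
    · rw [show ((fun k =>
          PySem.List.pyGetD ["price", "anecdotes", "food", "ambience", "service"]
              (PySem.Int.floordiv (PySem.Int.mod ((k : Nat) : Int) 25) 5) ""
            ++ " - " ++
            PySem.List.pyGetD ["positive", "neutral", "negative", "conflict", "none"]
              (PySem.Int.mod ((k : Nat) : Int) 5) "") ∘ (fun j => 25 * m + j))
          = (fun j =>
            PySem.List.pyGetD ["price", "anecdotes", "food", "ambience", "service"]
                (PySem.Int.floordiv (PySem.Int.mod ((25 * m + j : Nat) : Int) 25) 5) ""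
              ++ " - " ++
              PySem.List.pyGetD ["positive", "neutral", "negative", "conflict", "none"]
                (PySem.Int.mod ((25 * m + j : Nat) : Int) 5) "") from rfl,
        hC, List.replicate_succ', List.flatten_append]
      simp

-- ===== VERDICT =====
theorem add_ABS_list_spec : Claim_equal_add_ABS_list := by
  intro reviews _
  show add_ABS_list reviews = add_ABS_list_alt reviews
  unfold add_ABS_list add_ABS_list_alt
  dsimp only
  rw [pv_outer, pv_pairfold, PySem.List.pyRange_one]
  have ht : ((25 * (reviews.length : Int) - 0)).toNat = 25 * reviews.length := by omega
  rw [ht]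
  simp only [List.map_map, zero_add]
  have hB := pv_B reviews reviews.length (le_refl _)
  have h1 := congrArg Prod.fst hB
  have h2 := congrArg Prod.snd hB
  simp only at h1 h2
  simp only [Function.comp_def] at *
  rw [h1, h2, List.take_length]
  refine Prod.ext ?_ ?_ <;> simp only [List.nil_append]
  · refine congrArg₂ _ (funext fun r => ?_) rfl
    rfl
  · rfl
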